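-- pv_equiv track=rewrite | github.com/anh151/pscan_query | app_utils.py | parse_gene_text
-- ===== SOURCE A (Python) =====
-- def parse_gene_text(text_entered):
--     text_entered = text_entered.split("\n")
--     genes = []
--     for gene1 in text_entered:
--         for gene2 in gene1.strip().split(","):
--             gene = gene2.strip().upper()
--             if len(gene) != 0:
--                 genes.append(gene)
--     if len(genes) == 0:
--         return None
--     return genes
-- ===== SOURCE B (Python) =====
-- def parse_gene_text(text_entered):
--     # Single left-to-right character scan: flush the current token on either
--     # delimiter ('\n' or ','), instead of A's nested split-then-split passes.
--     genes = []
--     cur = []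
--     for ch in text_entered + "\n":
--         if ch == "\n" or ch == ",":
--             gene = "".join(cur).strip().upper()
--             if gene:
--                 genes.append(gene)
--             cur = []
--         else:
--             cur.append(ch)
--     return genes if genes else None
-- ===== Notes on version B (the rewrite author's own statement) =====
-- stated objective: alternative
-- what changed: Replaced the nested newline-split-then-comma-split with a single left-to-right character scan that flushes the current token on either delimiter; strip/upper/non-empty filtering per token is unchanged.
import Mathlib
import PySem

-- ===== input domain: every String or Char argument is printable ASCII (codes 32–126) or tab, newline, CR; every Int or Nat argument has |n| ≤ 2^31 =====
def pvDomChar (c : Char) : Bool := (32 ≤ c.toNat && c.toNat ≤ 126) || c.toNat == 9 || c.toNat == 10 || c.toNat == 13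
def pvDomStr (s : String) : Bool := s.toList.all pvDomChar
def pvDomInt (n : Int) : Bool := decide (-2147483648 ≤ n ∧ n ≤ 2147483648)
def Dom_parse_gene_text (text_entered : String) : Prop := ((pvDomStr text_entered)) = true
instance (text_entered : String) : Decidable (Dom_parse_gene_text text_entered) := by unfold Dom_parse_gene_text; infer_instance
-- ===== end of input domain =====

-- B replaces A's nested newline-then-comma splitting by a single character scan; objective: alternative decomposition, same cost.

-- ===== PORT A =====
-- A, step for step: split on "\n", then per line strip and split on ",",
-- strip().upper() each piece and append the non-empty ones; None if nothing was collected.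
def parse_gene_text (text_entered : String) : Option (List String) :=
  let lines := PySem.Chars.splitOn text_entered.toList ['\n']
  let genes : List String := lines.foldl (fun genes gene1 =>
    (PySem.Chars.splitOn (PySem.Chars.strip gene1) [',']).foldl (fun genes gene2 =>
      let gene := PySem.Chars.upper (PySem.Chars.strip gene2)
      if gene.length ≠ 0 then genes ++ [String.ofList gene] else genes) genes) []
  if genes.length = 0 then none else some genes

-- ===== PORT B =====
-- B, step for step: one fold over the characters of text + "\n"; a delimiter
-- flushes the stripped/uppered current token (append if non-empty), any other
-- character extends the current token.
def parse_gene_text_alt (text_entered : String) : Option (List String) :=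
  let step : List String × List Char → Char → List String × List Char := fun s ch =>
    if ch = '\n' ∨ ch = ',' then
      let gene := PySem.Chars.upper (PySem.Chars.strip s.2)
      (if gene.length ≠ 0 then s.1 ++ [String.ofList gene] else s.1, [])
    else (s.1, s.2 ++ [ch])
  let r := (text_entered.toList ++ ['\n']).foldl step ([], [])
  if r.1 = [] then none else some r.1

-- ===== PRECONDITION & SPEC =====
def Spec_parse_gene_text (text_entered : String) (out : Option (List String)) : Prop := out = parse_gene_text_alt text_entered
instance (text_entered : String) (out : Option (List String)) : Decidable (Spec_parse_gene_text text_entered out) := by unfold Spec_parse_gene_text; infer_instance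

-- ===== CLAIM (what is proved, stated in full; the proofs are below) =====
def Claim_equal_parse_gene_text : Prop := ∀ (text_entered : String), Dom_parse_gene_text text_entered → Spec_parse_gene_text text_entered (parse_gene_text text_entered)

-- ===== LEMMAS AND PROOFS =====

def pvTok (d : Char → Bool) : List Char → List (List Char)
  | [] => [[]]
  | c :: cs => if d c then [] :: pvTok d cs else (pvTok d cs).modifyHead (c :: ·)
def pvMLast (f : List Char → List Char) : List (List Char) → List (List Char)
  | [] => []
  | [t] => [f t]
  | t :: t' :: ts => t :: pvMLast f (t' :: ts)
theorem pvTok_ne_nil (d : Char → Bool) (cs : List Char) : pvTok d cs ≠ [] := by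
  cases cs with
  | nil => simp [pvTok]
  | cons c cs =>
    simp only [pvTok]
    split
    · simp
    · rcases h : pvTok d cs with _ | ⟨t, ts⟩
      · exact absurd h (pvTok_ne_nil d cs)
      · simp

theorem pvTok_all_nondelim (d : Char → Bool) (cs : List Char) (h : ∀ x ∈ cs, d x = false) :
    pvTok d cs = [cs] := by
  induction cs with
  | nil => rfl
  | cons c cs ih =>
    have hc : d c = false := h c (by simp)
    simp [pvTok, hc, ih (fun x hx => h x (by simp [hx]))]

theorem pvTok_singleton (d : Char → Bool) (cs t : List Char) (h : pvTok d cs = [t]) : t = cs := by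
  induction cs generalizing t with
  | nil => simp [pvTok] at h; exact h
  | cons c cs ih =>
    by_cases hc : d c
    · simp [pvTok, hc] at h
      exact absurd h.2 (pvTok_ne_nil d cs)
    · simp only [pvTok, hc, Bool.false_eq_true, if_false] at h
      rcases h2 : pvTok d cs with _ | ⟨t0, ts⟩
      · exact absurd h2 (pvTok_ne_nil d cs)
      · rw [h2] at h
        simp [List.modifyHead] at h
        rcases h with ⟨h1, h3⟩
        subst h3
        rw [← h1, ih t0 h2]
theorem pvRstrip_cons (c : Char) (l : List Char) :
    PySem.Chars.rstrip (c :: l)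
      = if PySem.Chars.isspace c ∧ PySem.Chars.rstrip l = [] then []
        else c :: PySem.Chars.rstrip l := by
  have hnil : (PySem.Chars.rstrip l = []) ↔ (List.dropWhile PySem.Chars.isspace l.reverse = []) := by
    simp [PySem.Chars.rstrip]
  simp only [PySem.Chars.rstrip, List.reverse_cons, List.dropWhile_append]
  by_cases hd : List.dropWhile PySem.Chars.isspace l.reverse = []
  · by_cases hc : PySem.Chars.isspace c
    · simp [hd, hc, List.dropWhile]
    · simp [hd, hc, List.dropWhile]
  · simp [hd, List.isEmpty_iff]
theorem pvRstrip_eq_nil_iff (l : List Char) :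
    PySem.Chars.rstrip l = [] ↔ ∀ x ∈ l, PySem.Chars.isspace x := by
  simp [PySem.Chars.rstrip, List.dropWhile_eq_nil_iff]
theorem pvLstrip_eq_nil_of (l : List Char) (h : ∀ x ∈ l, PySem.Chars.isspace x) :
    PySem.Chars.lstrip l = [] := by
  simp [PySem.Chars.lstrip, List.dropWhile_eq_nil_iff]; exact h
theorem pvLstrip_lstrip (l : List Char) :
    PySem.Chars.lstrip (PySem.Chars.lstrip l) = PySem.Chars.lstrip l := by
  induction l with
  | nil => rfl
  | cons c l ih =>
    by_cases hc : PySem.Chars.isspace c <;> simp [PySem.Chars.lstrip, hc] at *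
    · exact ih
theorem pvRstrip_rstrip (l : List Char) :
    PySem.Chars.rstrip (PySem.Chars.rstrip l) = PySem.Chars.rstrip l := by
  have : ∀ m : List Char, List.dropWhile PySem.Chars.isspace (List.dropWhile PySem.Chars.isspace m) = List.dropWhile PySem.Chars.isspace m := by
    intro m
    induction m with
    | nil => rfl
    | cons c m ih => by_cases hc : PySem.Chars.isspace c <;> simp [hc, ih]
  simp [PySem.Chars.rstrip, this]
theorem pvLstrip_rstrip_comm (l : List Char) :
    PySem.Chars.lstrip (PySem.Chars.rstrip l) = PySem.Chars.rstrip (PySem.Chars.lstrip l) := by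
  induction l with
  | nil => rfl
  | cons c l ih =>
    by_cases hc : PySem.Chars.isspace c
    · rw [pvRstrip_cons]
      by_cases hr : PySem.Chars.rstrip l = []
      · simp only [hc, hr, and_self, if_pos]
        have hall : ∀ x ∈ l, PySem.Chars.isspace x := (pvRstrip_eq_nil_iff l).mp hr
        have : PySem.Chars.lstrip (c :: l) = [] := by
          apply pvLstrip_eq_nil_of; intro x hx
          rcases List.mem_cons.mp hx with h | h
          · simpa [h] using hc
          · exact hall x h
        rw [this]; rfl
      · have h1 : PySem.Chars.lstrip (c :: PySem.Chars.rstrip l) = PySem.Chars.lstrip (PySem.Chars.rstrip l) := by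
          simp [PySem.Chars.lstrip, hc]
        have h2 : PySem.Chars.lstrip (c :: l) = PySem.Chars.lstrip l := by
          simp [PySem.Chars.lstrip, hc]
        simp [hc, hr, h1, h2, ih]
    · have h2 : PySem.Chars.lstrip (c :: l) = c :: l := by
        simp [PySem.Chars.lstrip, hc]
      have h1 : PySem.Chars.lstrip (c :: PySem.Chars.rstrip l) = c :: PySem.Chars.rstrip l := by
        simp [PySem.Chars.lstrip, hc]
      rw [pvRstrip_cons, if_neg (by simp [hc]), h1, h2, pvRstrip_cons, if_neg (by simp [hc])]
theorem pvStrip_lstrip (l : List Char) :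
    PySem.Chars.strip (PySem.Chars.lstrip l) = PySem.Chars.strip l := by
  simp [PySem.Chars.strip, pvLstrip_lstrip]
theorem pvStrip_rstrip (l : List Char) :
    PySem.Chars.strip (PySem.Chars.rstrip l) = PySem.Chars.strip l := by
  simp [PySem.Chars.strip, pvLstrip_rstrip_comm, pvRstrip_rstrip]

theorem pvTok_lstrip (d : Char → Bool) (cs : List Char)
    (hws : ∀ c, PySem.Chars.isspace c = true → d c = false) :
    pvTok d (PySem.Chars.lstrip cs) = (pvTok d cs).modifyHead PySem.Chars.lstrip := by
  induction cs with
  | nil => simp [PySem.Chars.lstrip, pvTok, List.modifyHead]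
  | cons c cs ih =>
    by_cases hc : PySem.Chars.isspace c
    · have hdc : d c = false := hws c hc
      have h1 : PySem.Chars.lstrip (c :: cs) = PySem.Chars.lstrip cs := by
        simp [PySem.Chars.lstrip, hc]
      rw [h1, ih]
      rcases h2 : pvTok d cs with _ | ⟨t, ts⟩
      · exact absurd h2 (pvTok_ne_nil d cs)
      · simp [pvTok, hdc, h2, List.modifyHead, PySem.Chars.lstrip, hc]
    · have h1 : PySem.Chars.lstrip (c :: cs) = c :: cs := by
        simp [PySem.Chars.lstrip, hc]
      rw [h1]
      by_cases hdc : d c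
      · simp [pvTok, hdc, List.modifyHead, PySem.Chars.lstrip]
      · rcases h2 : pvTok d cs with _ | ⟨t, ts⟩
        · exact absurd h2 (pvTok_ne_nil d cs)
        · simp [pvTok, hdc, h2, List.modifyHead, PySem.Chars.lstrip, hc]

theorem pvTok_rstrip (d : Char → Bool) (cs : List Char)
    (hws : ∀ c, PySem.Chars.isspace c = true → d c = false) :
    pvTok d (PySem.Chars.rstrip cs) = pvMLast PySem.Chars.rstrip (pvTok d cs) := by
  induction cs with
  | nil => simp [PySem.Chars.rstrip, pvTok, pvMLast]
  | cons c cs ih =>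
    by_cases hdc : d c
    · have hc : PySem.Chars.isspace c = false := by
        by_contra h
        have := hws c (by simpa using h)
        simp [this] at hdc
      rw [pvRstrip_cons, if_neg (by simp [hc])]
      have hl : pvTok d (c :: PySem.Chars.rstrip cs) = [] :: pvTok d (PySem.Chars.rstrip cs) := by
        simp [pvTok, hdc]
      have hr : pvTok d (c :: cs) = [] :: pvTok d cs := by simp [pvTok, hdc]
      rw [hl, hr, ih]
      rcases h2 : pvTok d cs with _ | ⟨t, ts⟩
      · exact absurd h2 (pvTok_ne_nil d cs)
      · cases ts <;> simp [pvMLast]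
    · by_cases hrn : PySem.Chars.rstrip cs = []
      · by_cases hc : PySem.Chars.isspace c
        · rw [pvRstrip_cons, if_pos ⟨hc, hrn⟩]
          have hall : ∀ x ∈ cs, PySem.Chars.isspace x := (pvRstrip_eq_nil_iff cs).mp hrn
          have htok : pvTok d cs = [cs] := pvTok_all_nondelim d cs (fun x hx => hws x (hall x hx))
          simp [pvTok, hdc, htok, List.modifyHead, pvMLast]
          rw [pvRstrip_cons, if_pos ⟨hc, hrn⟩]
        · rw [pvRstrip_cons, if_neg (by simp [hc])]
          rw [hrn]
          have hall : ∀ x ∈ cs, PySem.Chars.isspace x := (pvRstrip_eq_nil_iff cs).mp hrn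
          have htok : pvTok d cs = [cs] := pvTok_all_nondelim d cs (fun x hx => hws x (hall x hx))
          simp [pvTok, hdc, htok, List.modifyHead, pvMLast]
          rw [pvRstrip_cons, if_neg (by simp [hc]), hrn]
      · rw [pvRstrip_cons, if_neg (by simp [hrn])]
        simp only [pvTok, hdc, Bool.false_eq_true, if_false]  -- hdc : ¬ d c
        rw [ih]
        rcases h2 : pvTok d cs with _ | ⟨t, ts⟩
        · exact absurd h2 (pvTok_ne_nil d cs)
        · cases ts with
          | nil =>
            have ht : t = cs := pvTok_singleton d cs t h2
            subst ht
            simp [pvMLast, List.modifyHead, pvRstrip_cons, hrn]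
          | cons t' ts' =>
            simp [pvMLast, List.modifyHead]

def pvEmit (t : List Char) : List Char := PySem.Chars.upper (PySem.Chars.strip t)

theorem pvMap_emit_mLast (L : List (List Char)) :
    (pvMLast PySem.Chars.rstrip L).map pvEmit = L.map pvEmit := by
  match L with
  | [] => rfl
  | [t] => simp [pvMLast, pvEmit, pvStrip_rstrip]
  | t :: t' :: ts => simp [pvMLast, pvMap_emit_mLast (t' :: ts)]

theorem pvMap_emit_strip (d : Char → Bool) (cs : List Char)
    (hws : ∀ c, PySem.Chars.isspace c = true → d c = false) :
    (pvTok d (PySem.Chars.strip cs)).map pvEmit = (pvTok d cs).map pvEmit := by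
  show (pvTok d (PySem.Chars.rstrip (PySem.Chars.lstrip cs))).map pvEmit = _
  rw [pvTok_rstrip d _ hws, pvTok_lstrip d cs hws]
  rw [pvMap_emit_mLast]
  rcases h : pvTok d cs with _ | ⟨t, ts⟩
  · exact absurd h (pvTok_ne_nil d cs)
  · simp [List.modifyHead, pvEmit, pvStrip_lstrip]

theorem pvTok_flat (dN dP : Char → Bool) (cs : List Char)
    (hdisj : ∀ c, dN c = true → dP c = false) :
    (pvTok dN cs).flatMap (pvTok dP) = pvTok (fun c => dN c || dP c) cs := by
  induction cs with
  | nil => simp [pvTok]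
  | cons c cs ih =>
    by_cases hN : dN c
    · have hP : dP c = false := hdisj c hN
      simp only [pvTok, hN, Bool.true_or, if_true]
      rw [List.flatMap_cons, ← ih]
      simp [pvTok]
    · rcases h2 : pvTok dN cs with _ | ⟨t, ts⟩
      · exact absurd h2 (pvTok_ne_nil dN cs)
      · rw [h2] at ih
        have hL : pvTok dN (c :: cs) = (c :: t) :: ts := by
          simp [pvTok, hN, h2, List.modifyHead]
        by_cases hP : dP c
        · have hor : (dN c || dP c) = true := by simp [hP]
          have hR : pvTok (fun c => dN c || dP c) (c :: cs)
              = [] :: pvTok (fun c => dN c || dP c) cs := by simp [pvTok, hor]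
          have hPt : pvTok dP (c :: t) = [] :: pvTok dP t := by simp [pvTok, hP]
          rw [hL, hR, List.flatMap_cons, hPt, ← ih]
          simp
        · have hor : (dN c || dP c) = false := by simp [hN, hP]
          have hR : pvTok (fun c => dN c || dP c) (c :: cs)
              = (pvTok (fun c => dN c || dP c) cs).modifyHead (c :: ·) := by
            simp [pvTok, hor]
          have hPt : pvTok dP (c :: t) = (pvTok dP t).modifyHead (c :: ·) := by simp [pvTok, hP]
          rw [hL, hR, List.flatMap_cons, hPt, ← ih]
          rcases h3 : pvTok dP t with _ | ⟨u, us⟩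
          · exact absurd h3 (pvTok_ne_nil dP t)
          · simp [h3, List.modifyHead]


/-- The gene list both programs compute: tokenise on '\n'/',' at once, strip+upper, drop empties. -/
def pvGenes (cs : List Char) : List String :=
  (((pvTok (fun c => c == '\n' || c == ',') cs).map pvEmit).filter (·.length ≠ 0)).map String.ofList

-- splitOn with a single-character separator is pvTok --------------------------

theorem pvSplitOn_go (d : Char) (fuel : Nat) (l cur : List Char) (acc : List (List Char))
    (h : l.length < fuel) :
    PySem.Chars.splitOn.go [d] fuel l cur acc
      = acc.reverse ++ (pvTok (· == d) l).modifyHead (cur.reverse ++ ·) := by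
  induction fuel generalizing l cur acc with
  | zero => omega
  | succ fuel ih =>
    cases l with
    | nil => simp [PySem.Chars.splitOn.go, pvTok]
    | cons c rest =>
      simp only [PySem.Chars.splitOn.go]
      by_cases hc : c = d
      · subst hc
        have hp : List.isPrefixOf [c] (c :: rest) = true := by simp [List.isPrefixOf]
        rw [if_pos hp]
        rw [ih _ _ _ (by simpa using Nat.lt_of_succ_lt_succ h)]
        rcases h2 : pvTok (· == c) rest with _ | ⟨t, ts⟩
        · exact absurd h2 (pvTok_ne_nil _ rest)
        · simp [pvTok, h2, List.modifyHead]
      · have hp : List.isPrefixOf [d] (c :: rest) = false := by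
          simp [List.isPrefixOf]; intro h'; exact absurd h'.symm hc
        rw [if_neg (by simp [hp])]
        rw [ih _ _ _ (by simpa using Nat.lt_of_succ_lt_succ h)]
        rcases h2 : pvTok (· == d) rest with _ | ⟨t, ts⟩
        · exact absurd h2 (pvTok_ne_nil _ rest)
        · simp [pvTok, hc, h2]

theorem pvSplitOn_eq (d : Char) (cs : List Char) :
    PySem.Chars.splitOn cs [d] = pvTok (· == d) cs := by
  unfold PySem.Chars.splitOn
  rw [pvSplitOn_go d (cs.length + 1) cs [] [] (by omega)]
  rcases h : pvTok (· == d) cs with _ | ⟨t, ts⟩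
  · exact absurd h (pvTok_ne_nil _ cs)
  · simp [List.modifyHead]

-- A computes pvGenes ----------------------------------------------------------

theorem pvInner_foldl (ts : List (List Char)) (g : List String) :
    ts.foldl (fun genes gene2 =>
      let gene := PySem.Chars.upper (PySem.Chars.strip gene2)
      if gene.length ≠ 0 then genes ++ [String.ofList gene] else genes) g
    = g ++ ((ts.map pvEmit).filter (·.length ≠ 0)).map String.ofList := by
  induction ts generalizing g with
  | nil => simp
  | cons t ts ih =>
    rw [List.foldl_cons, ih, List.map_cons, List.filter_cons]
    simp only [pvEmit]
    by_cases h : (PySem.Chars.upper (PySem.Chars.strip t)).length ≠ 0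
    · have h' : PySem.Chars.upper (PySem.Chars.strip t) ≠ [] := by
        simpa [List.length_eq_zero_iff] using h
      simp [h]
    · have h' : PySem.Chars.upper (PySem.Chars.strip t) = [] := by
        simpa [List.length_eq_zero_iff] using h
      simp [h']

theorem pvNlComma_ws (c : Char) (h : PySem.Chars.isspace c = true) : (c == ',') = false := by
  by_contra hne
  have : c = ',' := by simpa using hne
  subst this
  simp [PySem.Chars.isspace] at h

theorem pvA_outer (lines : List (List Char)) (g : List String) :
    lines.foldl (fun genes gene1 =>
      (PySem.Chars.splitOn (PySem.Chars.strip gene1) [',']).foldl (fun genes gene2 =>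
        let gene := PySem.Chars.upper (PySem.Chars.strip gene2)
        if gene.length ≠ 0 then genes ++ [String.ofList gene] else genes) genes) g
    = g ++ (((lines.flatMap (pvTok (· == ','))).map pvEmit).filter (·.length ≠ 0)).map String.ofList := by
  induction lines generalizing g with
  | nil => simp
  | cons ln lines ih =>
    rw [List.foldl_cons, pvInner_foldl, ih]
    rw [pvSplitOn_eq, pvMap_emit_strip _ _ pvNlComma_ws]
    simp [List.flatMap_cons, List.map_append, List.filter_append]

theorem pvA_genes (cs : List Char) :
    (PySem.Chars.splitOn cs ['\n']).foldl (fun genes gene1 =>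
      (PySem.Chars.splitOn (PySem.Chars.strip gene1) [',']).foldl (fun genes gene2 =>
        let gene := PySem.Chars.upper (PySem.Chars.strip gene2)
        if gene.length ≠ 0 then genes ++ [String.ofList gene] else genes) genes) []
    = pvGenes cs := by
  have hdisj : ∀ c, (c == '\n') = true → (c == ',') = false := by
    intro c h
    have hc : c = '\n' := by simpa using h
    subst hc
    decide
  rw [pvSplitOn_eq, pvA_outer, pvTok_flat (· == '\n') (· == ',') cs hdisj]
  simp [pvGenes]

-- B computes pvGenes ----------------------------------------------------------

theorem pvB_scan (cs : List Char) (g : List String) (cur : List Char) :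
    ((cs ++ ['\n']).foldl (fun (s : List String × List Char) ch =>
        if ch = '\n' ∨ ch = ',' then
          (if (PySem.Chars.upper (PySem.Chars.strip s.2)).length ≠ 0
             then s.1 ++ [String.ofList (PySem.Chars.upper (PySem.Chars.strip s.2))] else s.1, [])
        else (s.1, s.2 ++ [ch])) (g, cur)).1
    = g ++ ((((pvTok (fun c => c == '\n' || c == ',') cs).modifyHead (cur ++ ·)).map pvEmit).filter (·.length ≠ 0)).map String.ofList := by
  induction cs generalizing g cur with
  | nil =>
    by_cases h : (PySem.Chars.upper (PySem.Chars.strip cur)).length ≠ 0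
    · have h' : PySem.Chars.upper (PySem.Chars.strip cur) ≠ [] := by
        simpa [List.length_eq_zero_iff] using h
      simp [pvTok, List.modifyHead, pvEmit, h']
    · have h' : PySem.Chars.upper (PySem.Chars.strip cur) = [] := by
        simpa [List.length_eq_zero_iff] using h
      simp [pvTok, List.modifyHead, pvEmit, h']
  | cons c cs ih =>
    by_cases hc : c = '\n' ∨ c = ','
    · have hb : (c == '\n' || c == ',') = true := by
        rcases hc with h | h <;> simp [h]
      rw [List.cons_append, List.foldl_cons, if_pos hc]
      rw [ih]
      have ht : pvTok (fun c => c == '\n' || c == ',') (c :: cs)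
          = [] :: pvTok (fun c => c == '\n' || c == ',') cs := by simp [pvTok, hb]
      rw [ht]
      by_cases h : (PySem.Chars.upper (PySem.Chars.strip cur)).length ≠ 0
      · have h' : PySem.Chars.upper (PySem.Chars.strip cur) ≠ [] := by
          simpa [List.length_eq_zero_iff] using h
        simp [List.modifyHead, pvEmit, h']
        rcases pvTok (fun c => c == '\n' || c == ',') cs with _ | ⟨t, ts⟩ <;> rfl
      · have h' : PySem.Chars.upper (PySem.Chars.strip cur) = [] := by
          simpa [List.length_eq_zero_iff] using h
        simp [List.modifyHead, pvEmit, h']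
        rcases pvTok (fun c => c == '\n' || c == ',') cs with _ | ⟨t, ts⟩ <;> rfl
    · have hb : (c == '\n' || c == ',') = false := by
        rcases (not_or.mp hc) with ⟨h1, h2⟩; simp [h1, h2]
      rw [List.cons_append, List.foldl_cons, if_neg hc]
      rw [ih]
      have ht : pvTok (fun c => c == '\n' || c == ',') (c :: cs)
          = (pvTok (fun c => c == '\n' || c == ',') cs).modifyHead (c :: ·) := by
        simp [pvTok, hb]
      rw [ht]
      rcases h2 : pvTok (fun c => c == '\n' || c == ',') cs with _ | ⟨t, ts⟩
      · exact absurd h2 (pvTok_ne_nil _ cs)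
      · simp [List.modifyHead]

-- ===== VERDICT (by name: the statement is the Claim_ definition above) =====
theorem parse_gene_text_spec : Claim_equal_parse_gene_text := by
  intro s _
  show parse_gene_text s = parse_gene_text_alt s
  unfold parse_gene_text parse_gene_text_alt
  dsimp only
  rw [pvA_genes, pvB_scan]
  rcases h : pvTok (fun c => c == '\n' || c == ',') s.toList with _ | ⟨t, ts⟩
  · exact absurd h (pvTok_ne_nil _ s.toList)
  · simp [pvGenes, h, List.modifyHead, List.length_eq_zero_iff]
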